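-- pv_equiv track=rewrite | github.com/NYX-Samir/RAG-complete-Pipeline | src/query_transformer.py | multi_query
-- ===== SOURCE A (Python) =====
-- from typing import List
--
-- def multi_query(original_query: str, num_queries: int = 3) -> List[str]:
--     if not original_query or not original_query.strip():
--         return []
--
--     base = original_query.strip()
--
--
--     candidates = [
--         base,
--         f"Explain {base}",
--         f"What are the rules related to {base}?",
--         f"Policy regarding {base}",
--         f"Company guidelines for {base}",
--     ]
--
--
--     seen = set()
--     unique = []
--     for q in candidates:
--         key = q.lower().strip()
--         if key not in seen:
--             unique.append(q)
--             seen.add(key)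
--
--     return unique[:num_queries]
-- ===== SOURCE B (Python) =====
-- def multi_query(original_query: str, num_queries: int = 3):
--     base = original_query.strip()
--     if not base:
--         return []
--     affixes = [
--         ("", ""),
--         ("Explain ", ""),
--         ("What are the rules related to ", "?"),
--         ("Policy regarding ", ""),
--         ("Company guidelines for ", ""),
--     ]
--     return [pre + base + suf for pre, suf in affixes][:num_queries]
-- ===== Notes on version B (the rewrite author's own statement) =====
-- stated objective: simpler
-- what changed: B replaces A's explicit candidate list plus seen-set dedup loop with an affix (prefix/suffix) table and a single comprehension, dropping the dedup entirely - the five templates provably always yield distinct keys.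
import Mathlib
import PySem

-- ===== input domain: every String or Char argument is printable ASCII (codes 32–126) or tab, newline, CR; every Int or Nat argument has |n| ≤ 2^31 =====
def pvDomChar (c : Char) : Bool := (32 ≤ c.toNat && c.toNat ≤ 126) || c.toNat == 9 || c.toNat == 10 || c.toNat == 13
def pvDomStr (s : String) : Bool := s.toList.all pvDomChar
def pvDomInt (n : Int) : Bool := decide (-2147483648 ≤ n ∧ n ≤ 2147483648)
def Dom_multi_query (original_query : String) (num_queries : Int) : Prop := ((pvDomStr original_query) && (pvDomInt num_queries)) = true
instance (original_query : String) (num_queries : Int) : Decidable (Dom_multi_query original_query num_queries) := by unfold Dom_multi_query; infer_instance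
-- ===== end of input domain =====

-- B replaces A's explicit candidate list plus seen-set dedup loop with an affix table and a
-- comprehension, dropping the dedup entirely (the five templates always yield distinct keys);
-- objective: simpler.

-- ===== PORT A =====
def multi_query (original_query : String) (num_queries : Int) : List String :=
  -- if not original_query or not original_query.strip(): return []
  if original_query.toList = [] ∨ PySem.Chars.strip original_query.toList = [] then []
  else
    let base : List Char := PySem.Chars.strip original_query.toList
    let candidates : List String :=
      [String.ofList base,
       String.ofList ("Explain ".toList ++ base),
       String.ofList ("What are the rules related to ".toList ++ base ++ "?".toList),
       String.ofList ("Policy regarding ".toList ++ base),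
       String.ofList ("Company guidelines for ".toList ++ base)]
    -- seen = set(); unique = []; for q in candidates: key = q.lower().strip(); …
    let r :=
      candidates.foldl
        (fun (st : PySem.Set (List Char) × List String) (q : String) =>
          let key := PySem.Chars.strip (PySem.Chars.lower q.toList)
          if st.1.contains key then st else (st.1.add key, st.2 ++ [q]))
        (PySem.Set.ofList ([] : List (List Char)), ([] : List String))
    PySem.List.slice r.2 none (some num_queries)

-- ===== PORT B =====
def multi_query_alt (original_query : String) (num_queries : Int) : List String :=
  let base : List Char := PySem.Chars.strip original_query.toList
  if base = [] then []
  else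
    let affixes : List (List Char × List Char) :=
      [("".toList, "".toList),
       ("Explain ".toList, "".toList),
       ("What are the rules related to ".toList, "?".toList),
       ("Policy regarding ".toList, "".toList),
       ("Company guidelines for ".toList, "".toList)]
    PySem.List.slice (affixes.map (fun a => String.ofList (a.1 ++ base ++ a.2))) none
      (some num_queries)

-- ===== PRECONDITION & SPEC =====
def Spec_multi_query (original_query : String) (num_queries : Int) (out : List String) : Prop := out = multi_query_alt original_query num_queries
instance (original_query : String) (num_queries : Int) (out : List String) : Decidable (Spec_multi_query original_query num_queries out) := by unfold Spec_multi_query; infer_instance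

-- ===== CLAIM (what is proved, stated in full; the proofs are below) =====
def Claim_equal_multi_query : Prop := ∀ (original_query : String) (num_queries : Int), Dom_multi_query original_query num_queries → Spec_multi_query original_query num_queries (multi_query original_query num_queries)

-- ===== LEMMAS AND PROOFS =====

-- lowering an ASCII letter never turns a non-space character into whitespace
theorem pv_isspace_lowerChar (c : Char) (h : PySem.Chars.isspace c = false) :
    PySem.Chars.isspace (PySem.Chars.lowerChar c) = false := by
  unfold PySem.Chars.lowerChar
  split
  · rename_i hu
    unfold PySem.Chars.isupper at hu
    simp [Char.le_def, UInt32.le_iff_toNat_le] at hu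
    have hc : 65 ≤ c.toNat ∧ c.toNat ≤ 90 := hu
    have hv : (Char.ofNat (c.toNat + 32)).toNat = c.toNat + 32 := by
      rw [Char.toNat_ofNat]
      have hval : (c.toNat + 32).isValidChar := by
        unfold Nat.isValidChar; omega
      simp [hval]
    unfold PySem.Chars.isspace
    simp [hv]
    omega
  · exact h

theorem pv_head?_dropWhile (p : Char → Bool) (l : List Char) :
    ∀ c ∈ (List.dropWhile p l).head?, p c = false := by
  induction l with
  | nil => simp [List.dropWhile]
  | cons x xs ih =>
    intro c hc
    rw [List.dropWhile_cons] at hc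
    split at hc
    · exact ih c hc
    · rename_i hpx
      simp at hc; subst hc; simpa using hpx

theorem pv_lstrip_eq_self (l : List Char)
    (h : ∀ c ∈ l.head?, PySem.Chars.isspace c = false) : PySem.Chars.lstrip l = l := by
  unfold PySem.Chars.lstrip
  cases l with
  | nil => rfl
  | cons x xs =>
    rw [List.dropWhile_cons, if_neg]
    simp [h x (by simp)]

theorem pv_rstrip_eq_self (l : List Char)
    (h : ∀ c ∈ l.getLast?, PySem.Chars.isspace c = false) : PySem.Chars.rstrip l = l := by
  have hl : PySem.Chars.lstrip l.reverse = l.reverse :=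
    pv_lstrip_eq_self l.reverse (by simpa [List.head?_reverse] using h)
  unfold PySem.Chars.lstrip at hl
  unfold PySem.Chars.rstrip
  rw [hl, List.reverse_reverse]

theorem pv_strip_eq_self (l : List Char)
    (h1 : ∀ c ∈ l.head?, PySem.Chars.isspace c = false)
    (h2 : ∀ c ∈ l.getLast?, PySem.Chars.isspace c = false) : PySem.Chars.strip l = l := by
  unfold PySem.Chars.strip
  rw [pv_lstrip_eq_self l h1, pv_rstrip_eq_self l h2]

theorem pv_head?_strip (l : List Char) :
    ∀ c ∈ (PySem.Chars.strip l).head?, PySem.Chars.isspace c = false := by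
  intro c hc
  unfold PySem.Chars.strip PySem.Chars.rstrip at hc
  have hx : ((List.dropWhile PySem.Chars.isspace (PySem.Chars.lstrip l).reverse).reverse) <+:
      PySem.Chars.lstrip l :=
    List.reverse_suffix.mp (by
      simpa [List.reverse_reverse] using
        (List.dropWhile_suffix (l := (PySem.Chars.lstrip l).reverse) PySem.Chars.isspace))
  obtain ⟨t, ht⟩ := hx
  cases hrev : (List.dropWhile PySem.Chars.isspace (PySem.Chars.lstrip l).reverse).reverse with
  | nil => rw [hrev] at hc; simp at hc
  | cons a bs =>
    rw [hrev] at hc ht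
    have hhm : (PySem.Chars.lstrip l).head? = some c := by
      rw [← ht]; simpa [Option.mem_def] using hc
    have : c ∈ (List.dropWhile PySem.Chars.isspace l).head? := by
      unfold PySem.Chars.lstrip at hhm; rw [hhm]; rfl
    exact pv_head?_dropWhile PySem.Chars.isspace l c this

theorem pv_getLast?_strip (l : List Char) :
    ∀ c ∈ (PySem.Chars.strip l).getLast?, PySem.Chars.isspace c = false := by
  intro c hc
  unfold PySem.Chars.strip PySem.Chars.rstrip at hc
  rw [← List.head?_reverse, List.reverse_reverse] at hc
  exact pv_head?_dropWhile PySem.Chars.isspace (PySem.Chars.lstrip l).reverse c hc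

-- the stripped core keeps non-space edges after lowercasing
theorem pv_head?_lower (b : List Char)
    (hH : ∀ c ∈ b.head?, PySem.Chars.isspace c = false) :
    ∀ c ∈ (PySem.Chars.lower b).head?, PySem.Chars.isspace c = false := by
  intro c hc
  unfold PySem.Chars.lower at hc
  rw [List.head?_map] at hc
  cases hhd : b.head? with
  | none => rw [hhd] at hc; simp at hc
  | some d =>
    rw [hhd] at hc; simp at hc; subst hc
    exact pv_isspace_lowerChar d (hH d (by rw [hhd]; rfl))

theorem pv_getLast?_lower (b : List Char)
    (hL : ∀ c ∈ b.getLast?, PySem.Chars.isspace c = false) :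
    ∀ c ∈ (PySem.Chars.lower b).getLast?, PySem.Chars.isspace c = false := by
  intro c hc
  unfold PySem.Chars.lower at hc
  rw [List.getLast?_map] at hc
  cases hhd : b.getLast? with
  | none => rw [hhd] at hc; simp at hc
  | some d =>
    rw [hhd] at hc; simp at hc; subst hc
    exact pv_isspace_lowerChar d (hL d (by rw [hhd]; rfl))

-- strip is the identity on P ++ B ++ S when every edge character is non-space
theorem pv_strip_append (P B S : List Char) (hB : B ≠ [])
    (hHB : ∀ c ∈ B.head?, PySem.Chars.isspace c = false)
    (hLB : ∀ c ∈ B.getLast?, PySem.Chars.isspace c = false)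
    (hP : ∀ c ∈ P.head?, PySem.Chars.isspace c = false)
    (hS : ∀ c ∈ S.getLast?, PySem.Chars.isspace c = false) :
    PySem.Chars.strip (P ++ B ++ S) = P ++ B ++ S := by
  apply pv_strip_eq_self
  · intro c hc
    cases P with
    | cons p ps =>
      simp at hc; subst hc; exact hP _ (by simp)
    | nil =>
      cases B with
      | nil => exact absurd rfl hB
      | cons d ds =>
        simp at hc; subst hc; exact hHB _ (by simp)
  · intro c hc
    rcases S.eq_nil_or_concat with rfl | ⟨s', x, rfl⟩
    · rw [List.append_nil, List.getLast?_append_of_ne_nil P hB] at hc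
      exact hLB c hc
    · rw [List.concat_eq_append] at hS hc
      rw [show P ++ B ++ (s' ++ [x]) = (P ++ B ++ s') ++ [x] by simp, List.getLast?_concat] at hc
      simp at hc; subst hc
      exact hS _ (by rw [List.getLast?_concat]; rfl)

-- two affixed copies of the same core differ whenever the affix lengths differ
theorem pv_affix_ne (B p1 s1 p2 s2 : List Char)
    (h : p1.length + s1.length ≠ p2.length + s2.length) :
    p1 ++ B ++ s1 ≠ p2 ++ B ++ s2 := by
  intro e
  apply h
  have hl := congrArg List.length e
  simp [List.length_append] at hl
  omega


theorem pv_lower_append (x y : List Char) :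
    PySem.Chars.lower (x ++ y) = PySem.Chars.lower x ++ PySem.Chars.lower y := by
  unfold PySem.Chars.lower; exact List.map_append ..

-- A's dedup loop is the identity when all keys are fresh and pairwise distinct
theorem pv_foldl_dedup (cs : List String) (seen : PySem.Set (List Char)) (acc : List String)
    (hfresh : ∀ c ∈ cs, PySem.Chars.strip (PySem.Chars.lower c.toList) ∉ seen)
    (hpw : cs.Pairwise (fun a b =>
      PySem.Chars.strip (PySem.Chars.lower a.toList) ≠ PySem.Chars.strip (PySem.Chars.lower b.toList))) :
    (cs.foldl
      (fun (st : PySem.Set (List Char) × List String) (q : String) =>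
        let key := PySem.Chars.strip (PySem.Chars.lower q.toList)
        if st.1.contains key then st else (st.1.add key, st.2 ++ [q]))
      (seen, acc)).2 = acc ++ cs := by
  induction cs generalizing seen acc with
  | nil => simp
  | cons c cs ih =>
    rw [List.foldl_cons]
    have hc : seen.contains (PySem.Chars.strip (PySem.Chars.lower c.toList)) = false := by
      have := hfresh c (by simp)
      simpa [PySem.Set.contains] using this
    simp only [hc, Bool.false_eq_true, if_false]
    rw [ih]
    · simp
    · intro c' hc'
      rw [PySem.Set.mem_add]
      rintro (hmem | heq)
      · exact hfresh c' (by simp [hc']) hmem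
      · exact (List.pairwise_cons.mp hpw).1 c' hc' heq.symm
    · exact (List.pairwise_cons.mp hpw).2


-- ===== VERDICT (by name: the statement is the Claim_ definition above) =====
set_option maxRecDepth 8192 in
theorem multi_query_spec : Claim_equal_multi_query := by
  intro q n _
  unfold Spec_multi_query multi_query multi_query_alt
  by_cases hb : PySem.Chars.strip q.toList = []
  · simp [hb]
  · have hq : ¬(q.toList = [] ∨ PySem.Chars.strip q.toList = []) := by
      rintro (h | h)
      · apply hb; rw [h]; rfl
      · exact hb h
    rw [if_neg hq, if_neg hb]
    set b := PySem.Chars.strip q.toList with hbdef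
    have hH : ∀ c ∈ b.head?, PySem.Chars.isspace c = false := pv_head?_strip q.toList
    have hL : ∀ c ∈ b.getLast?, PySem.Chars.isspace c = false := pv_getLast?_strip q.toList
    have hlowne : PySem.Chars.lower b ≠ [] := by
      unfold PySem.Chars.lower; simpa using hb
    have hHl := pv_head?_lower b hH
    have hLl := pv_getLast?_lower b hL
    have e0 : PySem.Chars.strip (PySem.Chars.lower (String.ofList b).toList)
        = PySem.Chars.lower b := by
      rw [String.toList_ofList]
      simpa using pv_strip_append [] (PySem.Chars.lower b) [] hlowne hHl hLl (by simp) (by simp)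
    have e1 : PySem.Chars.strip (PySem.Chars.lower (String.ofList ("Explain ".toList ++ b)).toList)
        = "explain ".toList ++ PySem.Chars.lower b := by
      rw [String.toList_ofList, pv_lower_append,
        show PySem.Chars.lower "Explain ".toList = "explain ".toList from by decide]
      simpa using pv_strip_append "explain ".toList (PySem.Chars.lower b) [] hlowne hHl hLl
        (by
        intro c hc
        rw [show ("explain ".toList).head? = some 'e' from by decide] at hc
        simp only [Option.mem_def, Option.some.injEq] at hc
        exact hc ▸ (by decide)) (by simp)
    have e2 : PySem.Chars.strip (PySem.Chars.lower
          (String.ofList ("What are the rules related to ".toList ++ b ++ "?".toList)).toList)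
        = "what are the rules related to ".toList ++ PySem.Chars.lower b ++ "?".toList := by
      rw [String.toList_ofList, pv_lower_append, pv_lower_append,
        show PySem.Chars.lower "What are the rules related to ".toList
          = "what are the rules related to ".toList from by decide,
        show PySem.Chars.lower "?".toList = "?".toList from by decide]
      exact pv_strip_append "what are the rules related to ".toList (PySem.Chars.lower b)
        "?".toList hlowne hHl hLl (by
        intro c hc
        rw [show ("what are the rules related to ".toList).head? = some 'w' from by decide] at hc
        simp only [Option.mem_def, Option.some.injEq] at hc
        exact hc ▸ (by decide)) (by
        intro c hc
        rw [show ("?".toList).getLast? = some '?' from by decide] at hc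
        simp only [Option.mem_def, Option.some.injEq] at hc
        exact hc ▸ (by decide))
    have e3 : PySem.Chars.strip (PySem.Chars.lower
          (String.ofList ("Policy regarding ".toList ++ b)).toList)
        = "policy regarding ".toList ++ PySem.Chars.lower b := by
      rw [String.toList_ofList, pv_lower_append,
        show PySem.Chars.lower "Policy regarding ".toList = "policy regarding ".toList from by decide]
      simpa using pv_strip_append "policy regarding ".toList (PySem.Chars.lower b) [] hlowne hHl hLl
        (by
        intro c hc
        rw [show ("policy regarding ".toList).head? = some 'p' from by decide] at hc
        simp only [Option.mem_def, Option.some.injEq] at hc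
        exact hc ▸ (by decide)) (by simp)
    have e4 : PySem.Chars.strip (PySem.Chars.lower
          (String.ofList ("Company guidelines for ".toList ++ b)).toList)
        = "company guidelines for ".toList ++ PySem.Chars.lower b := by
      rw [String.toList_ofList, pv_lower_append,
        show PySem.Chars.lower "Company guidelines for ".toList
          = "company guidelines for ".toList from by decide]
      simpa using pv_strip_append "company guidelines for ".toList (PySem.Chars.lower b) []
        hlowne hHl hLl (by
        intro c hc
        rw [show ("company guidelines for ".toList).head? = some 'c' from by decide] at hc
        simp only [Option.mem_def, Option.some.injEq] at hc
        exact hc ▸ (by decide)) (by simp)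
    have hpw : ([String.ofList b,
        String.ofList ("Explain ".toList ++ b),
        String.ofList ("What are the rules related to ".toList ++ b ++ "?".toList),
        String.ofList ("Policy regarding ".toList ++ b),
        String.ofList ("Company guidelines for ".toList ++ b)] : List String).Pairwise
        (fun a b' => PySem.Chars.strip (PySem.Chars.lower a.toList)
          ≠ PySem.Chars.strip (PySem.Chars.lower b'.toList)) := by
      refine List.Pairwise.cons ?_ (List.Pairwise.cons ?_ (List.Pairwise.cons ?_
        (List.Pairwise.cons ?_ (List.Pairwise.cons ?_ List.Pairwise.nil))))
      · intro a' ha'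
        simp only [List.mem_cons, List.not_mem_nil, or_false] at ha'
        rcases ha' with rfl | rfl | rfl | rfl
        · rw [e0, e1]
          simpa using pv_affix_ne (PySem.Chars.lower b) [] [] "explain ".toList [] (by decide)
        · rw [e0, e2]
          simpa using pv_affix_ne (PySem.Chars.lower b) [] []
            "what are the rules related to ".toList "?".toList (by decide)
        · rw [e0, e3]
          simpa using pv_affix_ne (PySem.Chars.lower b) [] [] "policy regarding ".toList [] (by decide)
        · rw [e0, e4]
          simpa using pv_affix_ne (PySem.Chars.lower b) [] [] "company guidelines for ".toList [] (by decide)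
      · intro a' ha'
        simp only [List.mem_cons, List.not_mem_nil, or_false] at ha'
        rcases ha' with rfl | rfl | rfl
        · rw [e1, e2]; simp
        · rw [e1, e3]; simp
        · rw [e1, e4]; simp
      · intro a' ha'
        simp only [List.mem_cons, List.not_mem_nil, or_false] at ha'
        rcases ha' with rfl | rfl
        · rw [e2, e3]; simp
        · rw [e2, e4]; simp
      · intro a' ha'
        simp only [List.mem_cons, List.not_mem_nil, or_false] at ha'
        rcases ha' with rfl
        rw [e3, e4]; simp
      · intro a' ha'
        simp at ha'
    have hfresh : ∀ c ∈ ([String.ofList b,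
        String.ofList ("Explain ".toList ++ b),
        String.ofList ("What are the rules related to ".toList ++ b ++ "?".toList),
        String.ofList ("Policy regarding ".toList ++ b),
        String.ofList ("Company guidelines for ".toList ++ b)] : List String),
        PySem.Chars.strip (PySem.Chars.lower c.toList) ∉ (PySem.Set.ofList ([] : List (List Char))) := by
      intro c _ hmem
      rw [PySem.Set.mem_ofList] at hmem
      simp at hmem
    dsimp only
    rw [pv_foldl_dedup _ _ _ hfresh hpw]
    simp only [List.nil_append, List.map_cons, List.map_nil, List.append_nil,
      show ("".toList : List Char) = [] from rfl]
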